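-- pv_equiv track=rewrite | github.com/digitalpoetry/adventofcode-2021 | aoc/day05.py | zip_longest_memo
-- ===== SOURCE A (Python) =====
-- import itertools
--
-- def zip_longest_memo(iter1, iter2):
--     iter1_last, iter2_last = None, None
--     for a, b in itertools.zip_longest(iter1, iter2, fillvalue=None):
--         if a is None:
--             a = iter1_last
--         if b is None:
--             b = iter2_last
--         iter1_last, iter2_last = a, b
--         yield a, b
-- ===== SOURCE B (Python) =====
-- def zip_longest_memo(iter1, iter2):
--     xs, ys = list(iter1), list(iter2)
--     for i in range(max(len(xs), len(ys))):
--         yield xs[min(i, len(xs) - 1)], ys[min(i, len(ys) - 1)]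
-- ===== Notes on version B (the rewrite author's own statement) =====
-- stated objective: simpler
-- what changed: Replaces the zip_longest-plus-last-value-memo generator loop by a direct index formula: for each i up to max length, yield the element at clamped index min(i, len-1) of each list, so no memo state is carried at all.
-- outside the precondition, e.g. on zip_longest_memo([], [1, 2]): A returns [(None, 1), (None, 2)], B raises IndexError
import Mathlib
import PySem

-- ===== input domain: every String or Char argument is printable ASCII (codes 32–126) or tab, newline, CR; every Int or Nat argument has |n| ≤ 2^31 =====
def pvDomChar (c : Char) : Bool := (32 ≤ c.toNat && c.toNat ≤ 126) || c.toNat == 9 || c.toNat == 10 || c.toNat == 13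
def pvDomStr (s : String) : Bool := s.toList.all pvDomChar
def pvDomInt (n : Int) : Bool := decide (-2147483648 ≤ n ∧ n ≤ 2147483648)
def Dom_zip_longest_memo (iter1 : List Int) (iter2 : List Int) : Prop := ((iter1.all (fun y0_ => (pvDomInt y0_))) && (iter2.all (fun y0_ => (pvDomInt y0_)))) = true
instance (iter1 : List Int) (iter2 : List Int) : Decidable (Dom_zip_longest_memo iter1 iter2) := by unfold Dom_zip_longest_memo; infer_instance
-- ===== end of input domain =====

-- B replaces the zip_longest + last-value-memo generator by a stateless clamped-index
-- formula (element min(i, len-1) of each list for each i); same cost, simpler.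


-- ===== PORT A =====
-- itertools.zip_longest(iter1, iter2, fillvalue=None): pad the shorter list with none
def zlOpt : List Int → List Int → List (Option Int × Option Int)
  | [], [] => []
  | [], b :: bs => (none, some b) :: zlOpt [] bs
  | a :: as, [] => (some a, none) :: zlOpt as []
  | a :: as, b :: bs => (some a, some b) :: zlOpt as bs

-- the generator loop: state is (iter1_last, iter2_last); 'if a is None: a = iter1_last'.
-- Outside Pre_ (one list empty, the other not) Python yields None, which is not an int;
-- the port emits the default 0 there — those inputs are excluded by Pre_.
def zlLoop : List (Option Int × Option Int) → Option Int → Option Int → List (Int × Int)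
  | [], _, _ => []
  | (a, b) :: rest, l1, l2 =>
    let a' : Option Int := match a with | none => l1 | some v => some v
    let b' : Option Int := match b with | none => l2 | some v => some v
    (a'.getD 0, b'.getD 0) :: zlLoop rest a' b'

def zip_longest_memo (iter1 : List Int) (iter2 : List Int) : List (Int × Int) :=
  zlLoop (zlOpt iter1 iter2) none none

-- ===== PORT B =====
def zip_longest_memo_alt (iter1 : List Int) (iter2 : List Int) : List (Int × Int) :=
  (PySem.List.pyRange 0 (max (iter1.length : Int) (iter2.length : Int)) 1).map (fun i =>
    (PySem.List.pyGetD iter1 (min i ((iter1.length : Int) - 1)) 0,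
     PySem.List.pyGetD iter2 (min i ((iter2.length : Int) - 1)) 0))

-- ===== PRECONDITION & SPEC =====
-- Pre_ excludes inputs where exactly one list is empty: there A yields pairs containing
-- None (not an int, outside the declared return type) and B raises IndexError.
def Pre_zip_longest_memo (iter1 : List Int) (iter2 : List Int) : Prop :=
  (iter1 = [] ↔ iter2 = [])
instance (iter1 : List Int) (iter2 : List Int) : Decidable (Pre_zip_longest_memo iter1 iter2) := by unfold Pre_zip_longest_memo; infer_instance

def pvWitness_zip_longest_memo : List Int × List Int := ([1, 2, 3], [4])

def Spec_zip_longest_memo (iter1 : List Int) (iter2 : List Int) (out : List (Int × Int)) : Prop := out = zip_longest_memo_alt iter1 iter2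
instance (iter1 : List Int) (iter2 : List Int) (out : List (Int × Int)) : Decidable (Spec_zip_longest_memo iter1 iter2 out) := by unfold Spec_zip_longest_memo; infer_instance

-- ===== CLAIM (what is proved, stated in full; the proofs are below) =====
def Claim_equal_zip_longest_memo : Prop := ∀ (iter1 : List Int) (iter2 : List Int), Dom_zip_longest_memo iter1 iter2 → Pre_zip_longest_memo iter1 iter2 → Spec_zip_longest_memo iter1 iter2 (zip_longest_memo iter1 iter2)

-- ===== LEMMAS AND PROOFS =====

-- the value A yields at position i from a list whose last seen value is d
def padGet (l : List Int) (d : Int) (i : Nat) : Int :=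
  if h : i < l.length then l[i] else l.getLastD d

theorem padGet_shift (a : Int) (as : List Int) (d : Int) (i : Nat) :
    padGet (a :: as) d (i + 1) = padGet as a i := by
  unfold padGet
  by_cases hcase : i < as.length
  · rw [dif_pos (by simpa using Nat.succ_lt_succ hcase), dif_pos hcase]
    simp
  · rw [dif_neg (by simpa using hcase), dif_neg hcase]
    exact List.getLastD_cons

theorem padGet_nil (d : Int) (i : Nat) : padGet [] d i = d := by
  simp [padGet]

theorem padGet_zero (a : Int) (as : List Int) (d : Int) : padGet (a :: as) d 0 = a := by
  simp [padGet]

theorem zlLoop_char (as : List Int) : ∀ (bs : List Int) (x y : Int),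
    zlLoop (zlOpt as bs) (some x) (some y)
      = (List.range (max as.length bs.length)).map
          (fun i => (padGet as x i, padGet bs y i)) := by
  induction as with
  | nil =>
    intro bs
    induction bs with
    | nil => intro x y; simp [zlOpt, zlLoop]
    | cons b bs' ih =>
      intro x y
      have h1 : zlLoop (zlOpt [] (b :: bs')) (some x) (some y)
          = (x, b) :: zlLoop (zlOpt [] bs') (some x) (some b) := by simp [zlOpt, zlLoop]
      have hm : max ([] : List Int).length (b :: bs').length
          = max ([] : List Int).length bs'.length + 1 := by
        simp only [List.length_nil, List.length_cons]; omega
      rw [h1, ih x b, hm, List.range_succ_eq_map, List.map_cons, List.map_map]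
      refine congrArg₂ List.cons ?_ ?_
      · simp only [padGet_nil, padGet_zero]
      · exact List.map_congr_left (fun i _ => by
          simp only [Function.comp_apply, Nat.succ_eq_add_one, padGet_shift, padGet_nil])
  | cons a as' ih =>
    intro bs x y
    cases bs with
    | nil =>
      have h1 : zlLoop (zlOpt (a :: as') []) (some x) (some y)
          = (a, y) :: zlLoop (zlOpt as' []) (some a) (some y) := by simp [zlOpt, zlLoop]
      have hm : max (a :: as').length ([] : List Int).length
          = max as'.length ([] : List Int).length + 1 := by
        simp only [List.length_nil, List.length_cons]; omega
      rw [h1, ih [] a y, hm, List.range_succ_eq_map, List.map_cons, List.map_map]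
      refine congrArg₂ List.cons ?_ ?_
      · simp only [padGet_nil, padGet_zero]
      · exact List.map_congr_left (fun i _ => by
          simp only [Function.comp_apply, Nat.succ_eq_add_one, padGet_shift, padGet_nil])
    | cons b bs' =>
      have h1 : zlLoop (zlOpt (a :: as') (b :: bs')) (some x) (some y)
          = (a, b) :: zlLoop (zlOpt as' bs') (some a) (some b) := by simp [zlOpt, zlLoop]
      have hm : max (a :: as').length (b :: bs').length
          = max as'.length bs'.length + 1 := by
        simp only [List.length_cons]; omega
      rw [h1, ih bs' a b, hm, List.range_succ_eq_map, List.map_cons, List.map_map]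
      refine congrArg₂ List.cons ?_ ?_
      · simp only [padGet_zero]
      · exact List.map_congr_left (fun i _ => by
          simp only [Function.comp_apply, Nat.succ_eq_add_one, padGet_shift])

-- B's clamped-index read equals A's pad-with-last value, for a nonempty list
theorem clamp_eq_padGet (h : Int) (t : List Int) (d : Int) (k : Nat) :
    PySem.List.pyGetD (h :: t) (min (k : Int) (((h :: t).length : Int) - 1)) 0
      = padGet (h :: t) d k := by
  have hlen : (((h :: t).length : Int) - 1) = (t.length : Int) := by
    simp only [List.length_cons]; push_cast; ring
  rw [hlen, ← Nat.cast_min, PySem.List.pyGetD_natCast]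
  unfold padGet
  by_cases hk : k < t.length + 1
  · rw [Nat.min_eq_left (Nat.lt_succ_iff.mp hk),
      List.getD_eq_getElem _ _ (by simpa using hk), dif_pos (by simpa using hk)]
  · rw [Nat.min_eq_right (by omega), List.getD_eq_getElem _ _ (by simp),
      dif_neg (by simpa using hk)]
    rw [List.getLastD_eq_getLast?,
      List.getLast?_eq_some_getLast (by simp : (h :: t) ≠ []),
      Option.getD_some, List.getLast_eq_getElem]
    congr 1

-- B on nonempty lists, as a range-over-Nat map of padGet
theorem alt_char (x : Int) (xs : List Int) (y : Int) (ys : List Int) :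
    zip_longest_memo_alt (x :: xs) (y :: ys)
      = (List.range (max (x :: xs).length (y :: ys).length)).map
          (fun k => (padGet (x :: xs) 0 k, padGet (y :: ys) 0 k)) := by
  unfold zip_longest_memo_alt
  have hN : (max ((x :: xs).length : Int) ((y :: ys).length : Int))
      = ((max (x :: xs).length (y :: ys).length : Nat) : Int) := by
    push_cast; ring
  rw [hN, PySem.List.pyRange_zero_nat, List.map_map]
  exact List.map_congr_left (fun k _ => by
    simp only [Function.comp_apply]
    rw [clamp_eq_padGet x xs 0 k, clamp_eq_padGet y ys 0 k])

-- ===== VERDICT (by name: the statement is the Claim_ definition above) =====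
theorem zip_longest_memo_spec : Claim_equal_zip_longest_memo := by
  intro iter1 iter2 _ hpre
  unfold Spec_zip_longest_memo
  cases iter1 with
  | nil =>
    have h2 : iter2 = [] := hpre.mp rfl
    subst h2
    simp [zip_longest_memo, zip_longest_memo_alt, zlOpt, zlLoop]
  | cons x xs =>
    cases iter2 with
    | nil => exact absurd (hpre.mpr rfl) (by simp)
    | cons y ys =>
      rw [alt_char]
      have hmax : max (x :: xs).length (y :: ys).length
          = max xs.length ys.length + 1 := by
        simp only [List.length_cons]; omega
      rw [hmax, List.range_succ_eq_map, List.map_cons, List.map_map]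
      rw [show zip_longest_memo (x :: xs) (y :: ys)
          = (x, y) :: zlLoop (zlOpt xs ys) (some x) (some y) from by simp [zip_longest_memo, zlOpt, zlLoop]]
      rw [zlLoop_char]
      refine congrArg₂ List.cons ?_ ?_
      · simp only [padGet_zero]
      · exact List.map_congr_left (fun i _ => by
          simp only [Function.comp_apply, Nat.succ_eq_add_one, padGet_shift])
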